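-- pv_equiv track=rewrite | github.com/cmhh22/Transformer-experiments | RAG-Chroma/src/generator.py | _extract_relevant_answer
-- ===== SOURCE A (Python) =====
-- def _extract_relevant_answer(context: str, question: str) -> str:
--     """
--     Extract relevant answer from context without LLM
--
--     Args:
--         context: Document context
--         question: User question
--
--     Returns:
--         Answer extracted from context
--     """
--     # Find relevant sentences
--     question_terms = set(question.lower().split())
--     sentences = context.replace('\n', ' ').split('.')
--
--     scored_sentences = []
--     for sentence in sentences:
--         sentence = sentence.strip()
--         if len(sentence) > 20:  # Ignore very short sentences
--             sentence_terms = set(sentence.lower().split())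
--             score = len(question_terms & sentence_terms)
--             if score > 0:
--                 scored_sentences.append((score, sentence))
--
--     # Sort by relevance
--     scored_sentences.sort(key=lambda x: x[0], reverse=True)
--
--     # Build response
--     if scored_sentences:
--         top_sentences = [s[1] for s in scored_sentences[:3]]
--         response = "Based on the documents:\n\n"
--         response += ". ".join(top_sentences) + "."
--         return response
--
--     return "No specific information found in the provided documents."
-- ===== SOURCE B (Python) =====
-- def _extract_relevant_answer(context: str, question: str) -> str:
--     # Bucket/counting approach: no comparison sort; walk possible scores from the
--     # maximum seen down to 1, collecting sentences in encounter order (= A's stable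
--     # descending sort), then keep the first three.
--     question_terms = set(question.lower().split())
--     scored = []
--     best = 0
--     for sentence in context.replace('\n', ' ').split('.'):
--         sentence = sentence.strip()
--         if len(sentence) > 20:
--             score = len(question_terms & set(sentence.lower().split()))
--             if score > 0:
--                 scored.append((score, sentence))
--                 best = max(best, score)
--     if not scored:
--         return "No specific information found in the provided documents."
--     top = []
--     for k in range(best, 0, -1):
--         for score, sentence in scored:
--             if score == k:
--                 top.append(sentence)
--     return "Based on the documents:\n\n" + ". ".join(top[:3]) + "."
-- ===== Notes on version B (the rewrite author's own statement) =====
-- stated objective: alternative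
-- what changed: Replaces the stable descending comparison sort of (score, sentence) pairs with a counting/bucket pass: track the maximum score while filtering, then walk scores from max down to 1 collecting matching sentences in encounter order and keep the first three.
import Mathlib
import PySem

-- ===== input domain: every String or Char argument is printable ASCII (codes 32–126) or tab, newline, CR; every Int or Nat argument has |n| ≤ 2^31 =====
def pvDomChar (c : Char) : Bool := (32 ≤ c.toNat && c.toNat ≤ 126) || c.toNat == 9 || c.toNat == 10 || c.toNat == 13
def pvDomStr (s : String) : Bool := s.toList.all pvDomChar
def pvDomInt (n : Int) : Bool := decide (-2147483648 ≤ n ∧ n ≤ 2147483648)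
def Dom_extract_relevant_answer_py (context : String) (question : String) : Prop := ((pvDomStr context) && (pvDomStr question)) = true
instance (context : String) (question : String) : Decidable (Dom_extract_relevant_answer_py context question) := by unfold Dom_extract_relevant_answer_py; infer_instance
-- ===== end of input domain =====

-- B replaces A's stable descending sort of (score, sentence) pairs by a counting/bucket
-- pass over scores from the maximum down (alternative decomposition, same results).

-- ===== PORT A =====
-- the per-sentence step of A's filtering loop (strip, length > 20, overlap score > 0)
def pvStepA (question_terms : List String) (acc : List (Int × String)) (sentence : String) :
    List (Int × String) :=
  let sentence := PySem.Str.strip sentence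
  if PySem.Str.len sentence > 20 then
    let sentence_terms := PySem.Set.ofList (PySem.Str.split₀ (PySem.Str.lower sentence))
    let score := PySem.Set.len (PySem.Set.inter question_terms sentence_terms)
    if score > 0 then acc ++ [(score, sentence)] else acc
  else acc

def extract_relevant_answer_py (context : String) (question : String) : String :=
  let question_terms := PySem.Set.ofList (PySem.Str.split₀ (PySem.Str.lower question))
  -- split? is exact here: the separator "." is nonempty, so it always returns some
  let sentences := (PySem.Str.split? (PySem.Str.replace context "\n" " ") ".").getD []
  let scored_sentences := sentences.foldl (pvStepA question_terms) []
  let scored_sentences := PySem.List.sorted scored_sentences (fun x => x.1) true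
  if scored_sentences ≠ [] then
    let top_sentences := (PySem.List.slice scored_sentences none (some 3)).map (fun s => s.2)
    "Based on the documents:\n\n" ++ PySem.Str.join ". " top_sentences ++ "."
  else
    "No specific information found in the provided documents."

-- ===== PORT B =====
-- the per-sentence step of B's filtering loop (same filter; also tracks the best score)
def pvStepB (question_terms : List String) (st : List (Int × String) × Int) (sentence : String) :
    List (Int × String) × Int :=
  let sentence := PySem.Str.strip sentence
  if PySem.Str.len sentence > 20 then
    let score := PySem.Set.len (PySem.Set.inter question_terms
      (PySem.Set.ofList (PySem.Str.split₀ (PySem.Str.lower sentence))))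
    if score > 0 then (st.1 ++ [(score, sentence)], max st.2 score) else st
  else st

def extract_relevant_answer_py_alt (context : String) (question : String) : String :=
  let question_terms := PySem.Set.ofList (PySem.Str.split₀ (PySem.Str.lower question))
  -- split? is exact here: the separator "." is nonempty, so it always returns some
  let st := ((PySem.Str.split? (PySem.Str.replace context "\n" " ") ".").getD []).foldl
    (pvStepB question_terms) ([], 0)
  if st.1 = [] then
    "No specific information found in the provided documents."
  else
    let top := (PySem.List.pyRange st.2 0 (-1)).foldl (fun acc k =>
      st.1.foldl (fun acc2 p => if p.1 == k then acc2 ++ [p.2] else acc2) acc) []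
    "Based on the documents:\n\n" ++ PySem.Str.join ". " (PySem.List.slice top none (some 3)) ++ "."

-- ===== PRECONDITION & SPEC =====
def Spec_extract_relevant_answer_py (context : String) (question : String) (out : String) : Prop := out = extract_relevant_answer_py_alt context question
instance (context : String) (question : String) (out : String) : Decidable (Spec_extract_relevant_answer_py context question out) := by unfold Spec_extract_relevant_answer_py; infer_instance

-- ===== CLAIM (what is proved, stated in full; the proofs are below) =====
def Claim_equal_extract_relevant_answer_py : Prop := ∀ (context : String) (question : String), Dom_extract_relevant_answer_py context question → Spec_extract_relevant_answer_py context question (extract_relevant_answer_py context question)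

-- ===== LEMMAS AND PROOFS =====

-- either both steps skip the sentence, or both append the same scored pair (B also raising its max)
theorem pv_step_cases (q : List String) (acc : List (Int × String)) (b : Int) (s : String) :
    (pvStepB q (acc, b) s = (acc, b) ∧ pvStepA q acc s = acc) ∨
    ∃ sc : Int, 0 < sc ∧
      pvStepB q (acc, b) s = (acc ++ [(sc, PySem.Str.strip s)], max b sc) ∧
      pvStepA q acc s = acc ++ [(sc, PySem.Str.strip s)] := by
  simp only [pvStepB, pvStepA]
  split_ifs with h1 h2
  · right; exact ⟨_, h2, rfl, rfl⟩
  · left; exact ⟨rfl, rfl⟩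
  · left; exact ⟨rfl, rfl⟩

-- B's filtering loop computes A's scored list in its first component, its second
-- component is nonnegative and bounds every score (each score also being ≥ 1)
theorem pv_fold_rel (q : List String) (sents : List String) :
    ∀ (acc : List (Int × String)) (b : Int),
      0 ≤ b → (∀ p ∈ acc, 1 ≤ p.1 ∧ p.1 ≤ b) →
      (sents.foldl (pvStepB q) (acc, b)).1 = sents.foldl (pvStepA q) acc ∧
      0 ≤ (sents.foldl (pvStepB q) (acc, b)).2 ∧
      (∀ p ∈ (sents.foldl (pvStepB q) (acc, b)).1,
        1 ≤ p.1 ∧ p.1 ≤ (sents.foldl (pvStepB q) (acc, b)).2) := by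
  induction sents with
  | nil => intro acc b hb hbd; exact ⟨rfl, hb, hbd⟩
  | cons s rest ih =>
    intro acc b hb hbd
    simp only [List.foldl_cons]
    rcases pv_step_cases q acc b s with ⟨hB, hA⟩ | ⟨sc, hsc, hB, hA⟩
    · rw [hB, hA]; exact ih acc b hb hbd
    · rw [hB, hA]
      apply ih
      · omega
      · intro p hp
        rcases List.mem_append.1 hp with h | h
        · have := hbd p h
          exact ⟨this.1, le_trans this.2 (le_max_left _ _)⟩
        · simp at h
          subst h
          exact ⟨by omega, le_max_right _ _⟩

-- appending one element on the right feeds it to insertBy (the stable insertion step)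
theorem pv_sorted_rev_snoc (xs : List (Int × String)) (x : Int × String) :
    PySem.List.sorted (xs ++ [x]) (fun p => p.1) true =
      PySem.List.insertBy (fun a b => decide (b.1 < a.1)) x
        (PySem.List.sorted xs (fun p => p.1) true) := by
  rw [PySem.List.sorted_rev_eq_foldl_insertBy, PySem.List.sorted_rev_eq_foldl_insertBy,
    List.foldl_append, List.foldl_cons, List.foldl_nil]

-- insertBy walks past a prefix it does not insert before
theorem pv_insertBy_append (before : (Int × String) → (Int × String) → Bool)
    (x : Int × String) (A S : List (Int × String))
    (h : ∀ a ∈ A, before x a = false) :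
    PySem.List.insertBy before x (A ++ S) = A ++ PySem.List.insertBy before x S := by
  induction A with
  | nil => rfl
  | cons a A' ih =>
    have ha := h a (by simp)
    simp only [List.cons_append, PySem.List.insertBy, ha]
    simp only [Bool.false_eq_true, if_false, List.cons.injEq, true_and]
    exact ih (fun a' ha' => h a' (by simp [ha']))

-- one counting-sort extraction step: with m an upper bound on all keys, the stable
-- descending sort is the m-block (in encounter order) followed by the sort of the rest
theorem pv_sorted_rev_split_max (xs : List (Int × String)) (m : Int)
    (h : ∀ p ∈ xs, p.1 ≤ m) :
    PySem.List.sorted xs (fun p => p.1) true =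
      xs.filter (fun p => p.1 == m) ++
        PySem.List.sorted (xs.filter (fun p => !(p.1 == m))) (fun p => p.1) true := by
  induction xs using List.reverseRecOn with
  | nil => rfl
  | append_singleton xs x ih =>
    have hxs : ∀ p ∈ xs, p.1 ≤ m := fun p hp => h p (by simp [hp])
    have hx : x.1 ≤ m := h x (by simp)
    rw [pv_sorted_rev_snoc, ih hxs, List.filter_append, List.filter_append]
    by_cases hxm : x.1 = m
    · have hfa : (List.filter (fun p => p.1 == m) [x]) = [x] := by simp [hxm]
      have hfb : (List.filter (fun p => !(p.1 == m)) [x]) = [] := by simp [hxm]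
      rw [hfa, hfb, List.append_nil]
      rw [pv_insertBy_append _ _ _ _ (by
        intro a ha
        have : a.1 = m := by simpa using (List.mem_filter.1 ha).2
        simp [this, hxm])]
      have hins : PySem.List.insertBy (fun a b => decide (b.1 < a.1)) x
          (PySem.List.sorted (xs.filter (fun p => !(p.1 == m))) (fun p => p.1) true) =
          x :: PySem.List.sorted (xs.filter (fun p => !(p.1 == m))) (fun p => p.1) true := by
        cases hS : PySem.List.sorted (xs.filter (fun p => !(p.1 == m))) (fun p => p.1) true with
        | nil => rfl
        | cons s S' =>
          have hsmem : s ∈ xs.filter (fun p => !(p.1 == m)) := by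
            rw [← PySem.List.mem_sorted _ (fun p => p.1) true, hS]; simp
          have hs : s.1 < m := by
            rcases List.mem_filter.1 hsmem with ⟨hmem, hne⟩
            have h1 := hxs s hmem
            have h2 : ¬ (s.1 = m) := by simpa using hne
            omega
          simp [PySem.List.insertBy, hxm, hs]
      rw [hins]
      simp
    · have hfa : (List.filter (fun p => p.1 == m) [x]) = [] := by simp [hxm]
      have hfb : (List.filter (fun p => !(p.1 == m)) [x]) = [x] := by simp [hxm]
      rw [hfa, hfb, List.append_nil]
      rw [pv_insertBy_append _ _ _ _ (by
        intro a ha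
        have ham : a.1 = m := by simpa using (List.mem_filter.1 ha).2
        have : ¬ (a.1 < x.1) := by omega
        simpa using this)]
      rw [pv_sorted_rev_snoc]

-- counting sort over a descending score range equals the stable descending sort
theorem pv_bucketize (M : Nat) :
    ∀ (xs : List (Int × String)), (∀ p ∈ xs, 1 ≤ p.1 ∧ p.1 ≤ (M : Int)) →
    PySem.List.sorted xs (fun p => p.1) true =
      (PySem.List.pyRange (M : Int) 0 (-1)).flatMap
        (fun k => xs.filter (fun p => p.1 == k)) := by
  induction M with
  | zero =>
    intro xs h
    cases xs with
    | nil => rfl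
    | cons p _ =>
      have := h p (by simp)
      exact absurd this (by simp; omega)
  | succ M ih =>
    intro xs h
    have hcons : PySem.List.pyRange ((M + 1 : Nat) : Int) 0 (-1) =
        ((M + 1 : Nat) : Int) :: PySem.List.pyRange ((M : Nat) : Int) 0 (-1) := by
      have := PySem.List.pyRange_neg_one_cons (a := ((M + 1 : Nat) : Int)) (b := 0)
        (by push_cast; omega)
      have h2 : ((M + 1 : Nat) : Int) - 1 = ((M : Nat) : Int) := by push_cast; ring
      rw [this, h2]
    rw [hcons, List.flatMap_cons]
    rw [pv_sorted_rev_split_max xs ((M + 1 : Nat) : Int) (fun p hp => (h p hp).2)]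
    congr 1
    have hcong : (PySem.List.pyRange ((M : Nat) : Int) 0 (-1)).flatMap
        (fun k => (xs.filter (fun p => !(p.1 == ((M + 1 : Nat) : Int)))).filter
          (fun p => p.1 == k)) =
        (PySem.List.pyRange ((M : Nat) : Int) 0 (-1)).flatMap
        (fun k => xs.filter (fun p => p.1 == k)) := by
      apply List.flatMap_congr
      intro k hk
      have hkle : k ≤ ((M : Nat) : Int) := (PySem.List.mem_pyRange_neg_one.1 hk).2
      rw [List.filter_filter]
      apply List.filter_congr
      intro p hp
      by_cases hpk : p.1 = k
      · have hne2 : ¬ (k = ((M : Nat) : Int) + 1) := by omega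
        simp [hpk, hne2]
      · simp [hpk]
    rw [← hcong]
    apply ih
    intro p hp
    rcases List.mem_filter.1 hp with ⟨hmem, hne⟩
    have hb := h p hmem
    have hne' : ¬ (p.1 = ((M + 1 : Nat) : Int)) := by simpa using hne
    constructor
    · exact hb.1
    · push_cast at hb hne' ⊢; omega

-- the nonempty branch: B's descending bucket walk lists exactly A's sorted top sentences
theorem pv_main (scored : List (Int × String)) (best : Int) (h2 : 0 ≤ best)
    (h3 : ∀ p ∈ scored, 1 ≤ p.1 ∧ p.1 ≤ best) :
    "Based on the documents:\n\n" ++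
        PySem.Str.join ". "
          ((PySem.List.slice (PySem.List.sorted scored (fun x => x.1) true) none (some 3)).map
            (fun s => s.2)) ++ "." =
      "Based on the documents:\n\n" ++
        PySem.Str.join ". "
          (PySem.List.slice
            ((PySem.List.pyRange best 0 (-1)).foldl (fun acc k =>
              scored.foldl (fun acc2 p => if p.1 == k then acc2 ++ [p.2] else acc2) acc) [])
            none (some 3)) ++ "." := by
  have hM : ((best.toNat : Nat) : Int) = best := Int.toNat_of_nonneg h2
  have hsorted := pv_bucketize best.toNat scored (by rw [hM]; exact h3)
  rw [hM] at hsorted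
  rw [hsorted]
  congr 2
  simp only [PySem.List.foldl_append_if]
  simp only [PySem.List.foldl_append_eq_flatMap, List.nil_append]
  rw [PySem.List.slice_to _ (by decide), PySem.List.slice_to _ (by decide)]
  rw [List.map_take]
  congr 1
  rw [List.map_flatMap]

-- ===== VERDICT (by name: the statement is the Claim_ definition above) =====
theorem extract_relevant_answer_py_spec : Claim_equal_extract_relevant_answer_py := by
  intro context question _
  unfold Spec_extract_relevant_answer_py
  simp only [extract_relevant_answer_py, extract_relevant_answer_py_alt]
  obtain ⟨h1, h2, h3⟩ := pv_fold_rel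
    (PySem.Set.ofList (PySem.Str.split₀ (PySem.Str.lower question)))
    ((PySem.Str.split? (PySem.Str.replace context "\n" " ") ".").getD [])
    [] 0 (le_refl 0) (by simp)
  rw [← h1]
  set st := ((PySem.Str.split? (PySem.Str.replace context "\n" " ") ".").getD []).foldl
    (pvStepB (PySem.Set.ofList (PySem.Str.split₀ (PySem.Str.lower question)))) ([], 0) with hst
  by_cases hempty : st.1 = []
  · rw [hempty, show PySem.List.sorted ([] : List (Int × String)) (fun x => x.1) true = [] from rfl]
    simp
  · rw [if_neg hempty,
      if_pos (fun hc => hempty ((PySem.List.sorted_eq_nil_iff _ _ _).1 hc))]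
    exact pv_main st.1 st.2 h2 h3
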